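-- pv_equiv track=rewrite | github.com/GuoBioinfoLab/CATT | bioTSApypy.py | SegmentFromCigar
-- ===== SOURCE A (Python) =====
-- def SegmentFromCigar(cigartuples):
--     start = 0
--     end = 0
--     pos = 0
--     flag = True
--     for it in cigartuples:
--         if flag and it[1] == 'M':
--             start = pos
--             flag = False
--         pos = pos + it[0]
--         if it[1] == 'M':
--             end = pos
--     return start, end
-- ===== SOURCE B (Python) =====
-- from itertools import accumulate
--
-- def SegmentFromCigar(cigartuples):
--     offsets = list(accumulate(length for length, _ in cigartuples))
--     m_idx = [i for i, (_, op) in enumerate(cigartuples) if op == 'M']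
--     if not m_idx:
--         return 0, 0
--     first, last = m_idx[0], m_idx[-1]
--     start = 0 if first == 0 else offsets[first - 1]
--     return start, offsets[last]
-- ===== Notes on version B (the rewrite author's own statement) =====
-- stated objective: alternative
-- what changed: Replaces A's one-pass state machine (start/end/pos/flag mutated per segment) by a prefix-sum decomposition: build the cumulative offsets with itertools.accumulate, collect the indices of 'M' segments, and read start/end off the offset just before the first 'M' and at the last 'M'.
import Mathlib
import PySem

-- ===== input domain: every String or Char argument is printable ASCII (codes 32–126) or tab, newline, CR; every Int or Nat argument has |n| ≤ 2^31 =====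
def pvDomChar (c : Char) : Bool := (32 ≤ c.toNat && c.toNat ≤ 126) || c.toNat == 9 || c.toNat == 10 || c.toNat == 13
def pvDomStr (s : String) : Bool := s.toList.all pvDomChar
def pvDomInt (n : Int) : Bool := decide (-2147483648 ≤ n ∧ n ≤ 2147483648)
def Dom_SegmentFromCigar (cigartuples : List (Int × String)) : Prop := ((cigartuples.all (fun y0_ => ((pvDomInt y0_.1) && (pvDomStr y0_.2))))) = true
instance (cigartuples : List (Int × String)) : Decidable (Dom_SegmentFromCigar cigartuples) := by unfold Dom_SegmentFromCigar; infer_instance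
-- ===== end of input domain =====

-- B computes the answer from prefix sums and the first/last 'M' indices instead of A's
-- one-pass state machine; objective: alternative decomposition (same O(n) cost).

-- ===== PORT A =====
-- the loop body of A, step for step
def stepA (st : Int × Int × Int × Bool) (it : Int × String) : Int × Int × Int × Bool :=
  let start := if st.2.2.2 && it.2 == "M" then st.2.2.1 else st.1
  let flag  := if st.2.2.2 && it.2 == "M" then false else st.2.2.2
  let pos   := st.2.2.1 + it.1
  let e     := if it.2 == "M" then pos else st.2.1
  (start, e, pos, flag)

def SegmentFromCigar (cigartuples : List (Int × String)) : Int × Int :=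
  let r := cigartuples.foldl stepA (0, 0, 0, true)
  (r.1, r.2.1)

-- ===== PORT B =====
-- itertools.accumulate of the lengths: running sums
def pvAccum (xs : List Int) (acc : Int) : List Int :=
  match xs with
  | [] => []
  | x :: t => (acc + x) :: pvAccum t (acc + x)

-- indexing below (offsets[first-1], offsets[last], m_idx[-1]) is always in range, so pyGetD is exact
def SegmentFromCigar_alt (cigartuples : List (Int × String)) : Int × Int :=
  let offsets := pvAccum (cigartuples.map (·.1)) 0
  let mIdx := ((PySem.List.enumerate cigartuples).filter (fun p => p.2.2 == "M")).map (·.1)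
  if mIdx.isEmpty then (0, 0)
  else
    let first := mIdx.headD 0
    let last := PySem.List.pyGetD mIdx (-1) 0
    let start := if first == 0 then 0 else PySem.List.pyGetD offsets (first - 1) 0
    (start, PySem.List.pyGetD offsets last 0)

-- ===== PRECONDITION & SPEC =====
def Spec_SegmentFromCigar (cigartuples : List (Int × String)) (out : Int × Int) : Prop := out = SegmentFromCigar_alt cigartuples
instance (cigartuples : List (Int × String)) (out : Int × Int) : Decidable (Spec_SegmentFromCigar cigartuples out) := by unfold Spec_SegmentFromCigar; infer_instance

-- ===== CLAIM (what is proved, stated in full; the proofs are below) =====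
def Claim_equal_SegmentFromCigar : Prop := ∀ (cigartuples : List (Int × String)), Dom_SegmentFromCigar cigartuples → Spec_SegmentFromCigar cigartuples (SegmentFromCigar cigartuples)

-- ===== LEMMAS AND PROOFS =====

/-- sum of the lengths -/
def sumL (xs : List (Int × String)) : Int := (xs.map (·.1)).sum

/-- positions (from the front) of the 'M' segments -/
def mIdxN : List (Int × String) → List Nat
  | [] => []
  | (_, op) :: t => if op == "M" then 0 :: (mIdxN t).map (· + 1) else (mIdxN t).map (· + 1)

/-- value of A's `end` after processing xs with flag already false -/
def endVal (xs : List (Int × String)) (e p : Int) : Int :=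
  ((mIdxN xs).getLast?).elim e (fun j => p + sumL (xs.take (j + 1)))

lemma my_getLast?_cons {α : Type} (a : α) (r : List α) (h : r ≠ []) :
    (a :: r).getLast? = r.getLast? := by
  cases r with
  | nil => exact absurd rfl h
  | cons b t => exact List.getLast?_cons_cons ..

lemma my_getLast?_map {α β : Type} (f : α → β) : ∀ (r : List α),
    (r.map f).getLast? = r.getLast?.map f := by
  intro r
  induction r with
  | nil => simp
  | cons a t ih =>
    cases t with
    | nil => simp
    | cons b u => simpa [List.getLast?_cons_cons] using ih

lemma mIdxN_lt : ∀ (xs : List (Int × String)), ∀ k ∈ mIdxN xs, k < xs.length := by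
  intro xs
  induction xs with
  | nil => simp [mIdxN]
  | cons x t ih =>
    obtain ⟨l, op⟩ := x
    intro k hk
    simp only [mIdxN] at hk
    by_cases h : op == "M" <;> simp [h] at hk
    · rcases hk with h0 | ⟨a, ha, rfl⟩
      · subst h0; simp
      · have := ih a ha; simp; omega
    · rcases hk with ⟨a, ha, rfl⟩
      have := ih a ha; simp; omega

lemma sumL_cons (l : Int) (op : String) (t : List (Int × String)) :
    sumL ((l, op) :: t) = l + sumL t := by simp [sumL]

lemma sumL_take_succ_cons (l : Int) (op : String) (t : List (Int × String)) (k : Nat) :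
    sumL (((l, op) :: t).take (k + 1)) = l + sumL (t.take k) := by
  simp [sumL, List.take_succ_cons]

lemma mIdxN_getLast?_cons_M (l : Int) (op : String) (t : List (Int × String)) (h : (op == "M") = true) :
    (mIdxN ((l, op) :: t)).getLast? = some (((mIdxN t).getLast?).elim 0 (· + 1)) := by
  simp only [mIdxN, h, if_true]
  rcases hlast : (mIdxN t).getLast? with _ | j
  · have ht : mIdxN t = [] := List.getLast?_eq_none_iff.mp hlast
    simp [ht]
  · have hne : mIdxN t ≠ [] := by intro hc; rw [hc] at hlast; simp at hlast
    rw [my_getLast?_cons _ _ (by simpa using hne), my_getLast?_map]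
    simp [hlast]

lemma mIdxN_getLast?_cons_notM (l : Int) (op : String) (t : List (Int × String)) (h : ¬ (op == "M") = true) :
    (mIdxN ((l, op) :: t)).getLast? = ((mIdxN t).getLast?).map (· + 1) := by
  simp only [mIdxN, h, if_false]
  exact my_getLast?_map _ _

lemma endVal_cons_M (l : Int) (op : String) (t : List (Int × String)) (h : (op == "M") = true)
    (e p : Int) : endVal ((l, op) :: t) e p = endVal t (p + l) (p + l) := by
  rw [endVal, endVal, mIdxN_getLast?_cons_M l op t h]
  rcases hlast : (mIdxN t).getLast? with _ | j <;>
    simp only [hlast, Option.elim_some, Option.elim_none]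
  · rw [sumL_take_succ_cons]; simp [sumL]
  · rw [sumL_take_succ_cons]; ring

lemma endVal_cons_notM (l : Int) (op : String) (t : List (Int × String)) (h : ¬ (op == "M") = true)
    (e p : Int) : endVal ((l, op) :: t) e p = endVal t e (p + l) := by
  rw [endVal, endVal, mIdxN_getLast?_cons_notM l op t h]
  rcases hlast : (mIdxN t).getLast? with _ | j <;>
    simp only [hlast, Option.map_none, Option.map_some, Option.elim_some, Option.elim_none]
  rw [sumL_take_succ_cons]; ring

lemma loopA_false : ∀ (xs : List (Int × String)) (s e p : Int),
    List.foldl stepA (s, e, p, false) xs = (s, endVal xs e p, p + sumL xs, false) := by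
  intro xs
  induction xs with
  | nil => intro s e p; simp [endVal, mIdxN, sumL]
  | cons x t ih =>
    obtain ⟨l, op⟩ := x
    intro s e p
    by_cases h : op == "M"
    · have hstep : stepA (s, e, p, false) (l, op) = (s, p + l, p + l, false) := by
        simp [stepA, h]
      rw [List.foldl_cons, hstep, ih, endVal_cons_M l op t h, sumL_cons]
      have : p + (l + sumL t) = p + l + sumL t := by ring
      rw [this]
    · have hstep : stepA (s, e, p, false) (l, op) = (s, e, p + l, false) := by
        simp [stepA, h]
      rw [List.foldl_cons, hstep, ih, endVal_cons_notM l op t h, sumL_cons]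
      have : p + (l + sumL t) = p + l + sumL t := by ring
      rw [this]

lemma loopA_true : ∀ (xs : List (Int × String)) (s e p : Int),
    List.foldl stepA (s, e, p, true) xs =
      ((mIdxN xs).head?).elim (s, e, p + sumL xs, true)
        (fun i => (p + sumL (xs.take i), endVal xs e p, p + sumL xs, false)) := by
  intro xs
  induction xs with
  | nil => intro s e p; simp [mIdxN, sumL]
  | cons x t ih =>
    obtain ⟨l, op⟩ := x
    intro s e p
    by_cases h : op == "M"
    · have hstep : stepA (s, e, p, true) (l, op) = (p, p + l, p + l, false) := by
        simp [stepA, h]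
      have hhead : (mIdxN ((l, op) :: t)).head? = some 0 := by simp [mIdxN, h]
      rw [List.foldl_cons, hstep, loopA_false, hhead, Option.elim_some,
        endVal_cons_M l op t h, sumL_cons]
      have h1 : p + (l + sumL t) = p + l + sumL t := by ring
      have h2 : p + sumL (((l, op) :: t).take 0) = p := by simp [sumL]
      rw [h1, h2]
    · have hstep : stepA (s, e, p, true) (l, op) = (s, e, p + l, true) := by
        simp [stepA, h]
      have hhead : (mIdxN ((l, op) :: t)).head? = ((mIdxN t).head?).map (· + 1) := by
        simp [mIdxN, h]
      rw [List.foldl_cons, hstep, ih, hhead, endVal_cons_notM l op t h, sumL_cons]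
      have h1 : p + (l + sumL t) = p + l + sumL t := by ring
      rcases hh : (mIdxN t).head? with _ | i <;>
        simp only [hh, Option.map_none, Option.map_some, Option.elim_none, Option.elim_some]
      · rw [h1]
      · rw [h1, sumL_take_succ_cons]
        have : p + l + sumL (t.take i) = p + (l + sumL (t.take i)) := by ring
        rw [this]

lemma pvAccum_getD : ∀ (xs : List Int) (a : Int) (k : Nat), k < xs.length →
    (pvAccum xs a).getD k 0 = a + (xs.take (k + 1)).sum := by
  intro xs
  induction xs with
  | nil => intro a k hk; simp at hk
  | cons x t ih =>
    intro a k hk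
    match k with
    | 0 => simp [pvAccum]
    | k + 1 =>
      simp only [pvAccum, List.getD_cons_succ]
      rw [ih (a + x) k (by simpa using hk)]
      simp [List.take_succ_cons]
      ring

lemma offsets_at (xs : List (Int × String)) (k : Nat) (hk : k < xs.length) :
    PySem.List.pyGetD (pvAccum (xs.map (·.1)) 0) (k : Int) 0 = sumL (xs.take (k + 1)) := by
  rw [PySem.List.pyGetD_natCast]
  rw [pvAccum_getD _ 0 k (by simpa using hk)]
  simp [sumL, List.map_take]

lemma enum_filter_map : ∀ (xs : List (Int × String)) (s : Int),
    ((PySem.List.enumerate xs s).filter (fun p => p.2.2 == "M")).map (·.1)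
      = (mIdxN xs).map (fun k => s + Int.ofNat k) := by
  intro xs
  induction xs with
  | nil => intro s; simp [mIdxN]
  | cons x t ih =>
    obtain ⟨l, op⟩ := x
    intro s
    rw [PySem.List.enumerate_cons]
    have hmap : ((mIdxN t).map (· + 1)).map (fun k : Nat => s + Int.ofNat k)
        = (mIdxN t).map (fun k : Nat => (s + 1) + Int.ofNat k) := by
      rw [List.map_map]
      apply List.map_congr_left
      intro a _
      simp only [Function.comp, Int.ofNat_eq_natCast]
      push_cast; ring
    by_cases h : op == "M"
    · rw [List.filter_cons_of_pos (by simpa using h), List.map_cons, ih (s + 1)]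
      conv_rhs => rw [mIdxN]
      simp [h, hmap]
      intro a _; ring
    · rw [List.filter_cons_of_neg (by simpa using h), ih (s + 1)]
      conv_rhs => rw [mIdxN]
      simp [h, hmap]
      intro a _; ring

lemma alt_char : ∀ (xs : List (Int × String)),
    SegmentFromCigar_alt xs =
      ((mIdxN xs).head?).elim (0, 0) (fun i => (sumL (xs.take i), endVal xs 0 0)) := by
  intro xs
  unfold SegmentFromCigar_alt
  rw [enum_filter_map xs 0]
  rcases hm : mIdxN xs with _ | ⟨i, r⟩
  · simp
  · have hlt : ∀ k ∈ mIdxN xs, k < xs.length := mIdxN_lt xs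
    rw [hm] at hlt
    have hlti : i < xs.length := hlt i (by simp)
    simp only [List.map_cons, List.isEmpty_cons, Bool.false_eq_true, if_false,
      List.headD_cons, List.head?_cons, Option.elim_some]
    rcases hr : r.getLast? with _ | j
    · -- r = []: the only M index is i
      have hrnil : r = [] := List.getLast?_eq_none_iff.mp hr
      subst hrnil
      have hlastfull : (mIdxN xs).getLast? = some i := by rw [hm]; simp
      rw [PySem.List.pyGetD_neg_one _ _ (by simp)]
      simp only [List.map_nil, List.getLast_singleton]
      rw [endVal, hlastfull, Option.elim_some]
      have h0 : (0 + Int.ofNat i) = (i : Int) := by simp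
      rw [h0, offsets_at xs i hlti]
      by_cases hi : i = 0
      · subst hi; simp [sumL]
      · have hbe : ((i : Int) == 0) = false := by
          simp; exact_mod_cast hi
        rw [hbe]
        simp only [Bool.false_eq_true, if_false]
        have hsub : (i : Int) - 1 = ((i - 1 : Nat) : Int) := by omega
        rw [hsub, offsets_at xs (i - 1) (by omega)]
        have hsu : i - 1 + 1 = i := by omega
        rw [hsu]
        simp
    · -- r nonempty: the last M index is r's last
      have hrne : r ≠ [] := by intro hc; rw [hc] at hr; simp at hr
      have hlastfull : (mIdxN xs).getLast? = some j := by
        rw [hm, my_getLast?_cons _ _ hrne, hr]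
      have hltj : j < xs.length := by
        apply hlt
        right
        exact List.mem_of_mem_getLast? (by simpa using hr)
      have hmapne : r.map (fun k : Nat => (0 : Int) + Int.ofNat k) ≠ [] := by simpa using hrne
      rw [PySem.List.pyGetD_neg_one _ _ (by simp [hmapne]), List.getLast_cons hmapne]
      have hgl : (r.map (fun k : Nat => (0 : Int) + Int.ofNat k)).getLast hmapne = (j : Int) := by
        have h1 : (r.map (fun k : Nat => (0 : Int) + Int.ofNat k)).getLast? = some ((0 : Int) + Int.ofNat j) := by
          rw [my_getLast?_map, hr]; simp
        have h2 := List.getLast?_eq_getLast (l := r.map (fun k : Nat => (0 : Int) + Int.ofNat k)) hmapne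
        rw [h1] at h2
        have h3 := Option.some.inj h2
        simp at h3 ⊢
        omega
      rw [hgl, endVal, hlastfull, Option.elim_some, offsets_at xs j hltj]
      have h0 : (0 + Int.ofNat i) = (i : Int) := by simp
      rw [h0]
      by_cases hi : i = 0
      · subst hi; simp [sumL]
      · have hbe : ((i : Int) == 0) = false := by
          simp; exact_mod_cast hi
        rw [hbe]
        simp only [Bool.false_eq_true, if_false]
        have hsub : (i : Int) - 1 = ((i - 1 : Nat) : Int) := by omega
        rw [hsub, offsets_at xs (i - 1) (by omega)]
        have hsu : i - 1 + 1 = i := by omega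
        rw [hsu]
        simp

-- ===== VERDICT (by name: the statement is the Claim_ definition above) =====
theorem SegmentFromCigar_spec : Claim_equal_SegmentFromCigar := by
  intro xs _
  unfold Spec_SegmentFromCigar SegmentFromCigar
  rw [alt_char, loopA_true]
  rcases hh : (mIdxN xs).head? with _ | i <;>
    simp [hh, endVal, sumL]
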